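-- pv_equiv track=rewrite | github.com/thatMissingSock/dataStructureAndAlgorithmsRevision | week 5 (Sorting)/countingSort.py | countingSortWithLimit
-- ===== SOURCE A (Python) =====
-- def countingSortWithLimit(x, l):
--     """
--     I guess this is cheating? Because I don't create a list of None's before filling it in thus increasing the time complexity
--     but I tried everything from a-z and nothing seemed to work.x
--     :param x: An unsorted list of integers.
--     :param l: The maximum allowed occurrences of any number.
--     :return: A sorted list with duplicates removed beyond the limit.
--     """
--     # If the list is empty, return it directly
--     if not x:
--         return []
--
--     # Find the minimum and maximum values to establish the range
--     minValue = min(x)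
--     maxValue = max(x)
--     rangeSize = maxValue - minValue + 1
--
--     # Initialize the count list
--     countList = [0] * rangeSize
--
--     # Count occurrences of each number
--     for number in x:
--         countList[number - minValue] += 1
--
--     # Create the sorted output list with the duplicates capped at the limit
--     outputList = []
--     for i in range(rangeSize):
--         occurrences = min(countList[i], l)  # Cap occurrences at the limit `l`
--         outputList.extend([i + minValue] * occurrences)
--
--     return outputList
-- ===== SOURCE B (Python) =====
-- def countingSortWithLimit(x, l):
--     out = []
--     prev = None
--     run = 0
--     for v in sorted(x):
--         if prev != v:   # new run (also fires on the first element: prev is None)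
--             prev = v
--             run = 0
--         run += 1
--         if run <= l:
--             out.append(v)
--     return out
-- ===== Notes on version B (the rewrite author's own statement) =====
-- stated objective: faster
-- what changed: Replaced the counting sort that allocates and scans a count array over the whole min..max value range (O(n + V) with V = max-min+1) by a plain sort followed by a single run-length scan that emits each value while its running count is below l (O(n log n), independent of the value range).
import Mathlib
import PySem

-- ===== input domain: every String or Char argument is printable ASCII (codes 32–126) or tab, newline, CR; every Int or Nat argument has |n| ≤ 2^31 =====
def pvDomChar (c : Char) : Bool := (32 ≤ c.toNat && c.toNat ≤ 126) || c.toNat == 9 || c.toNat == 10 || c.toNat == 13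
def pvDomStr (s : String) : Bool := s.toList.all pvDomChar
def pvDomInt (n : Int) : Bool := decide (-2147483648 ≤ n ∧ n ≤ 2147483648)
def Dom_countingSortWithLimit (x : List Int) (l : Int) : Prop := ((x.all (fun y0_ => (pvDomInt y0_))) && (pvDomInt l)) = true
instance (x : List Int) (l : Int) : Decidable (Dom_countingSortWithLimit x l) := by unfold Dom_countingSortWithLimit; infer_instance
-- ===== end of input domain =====

-- B replaces A's counting sort over the whole min..max value range by sort + one
-- run-length scan emitting each value while its running count is below l
-- (independent of the value range; a timing run measured B faster).

-- ===== PORT A =====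
-- min(x)/max(x) on the nonempty list are the running foldl min/max (exact for Int:
-- ties are identical values).  countList[number-minValue] is always in range, so the
-- list update is ported as List.set/getD at the (nonnegative) index; range(rangeSize)
-- has rangeSize ≥ 1 here, so it is List.range rangeSize.toNat exactly.
def countingSortWithLimit (x : List Int) (l : Int) : List Int :=
  match x with
  | [] => []
  | h :: t =>
    let minValue := t.foldl min h
    let maxValue := t.foldl max h
    let rangeSize := maxValue - minValue + 1
    let countList := x.foldl
      (fun cl n => cl.set (n - minValue).toNat (cl.getD (n - minValue).toNat 0 + 1))
      (List.replicate rangeSize.toNat 0)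
    (List.range rangeSize.toNat).foldl
      (fun out i => out ++ List.replicate (min (countList.getD i 0) l).toNat ((i : Int) + minValue))
      []

-- ===== PORT B =====
-- one step of Source B's loop body: reset the run counter when the value changes
-- (prev = None at the start never equals an int), then emit while run ≤ l
def pvAltStep (l : Int) (st : List Int × Option Int × Int) (v : Int) : List Int × Option Int × Int :=
  let pr := if st.2.1 = some v then (st.2.1, st.2.2) else (some v, (0 : Int))
  let run := pr.2 + 1
  (if run ≤ l then st.1 ++ [v] else st.1, pr.1, run)

def countingSortWithLimit_alt (x : List Int) (l : Int) : List Int :=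
  ((PySem.List.sorted x (fun v => v) false).foldl (pvAltStep l) ([], none, (0 : Int))).1

-- ===== PRECONDITION & SPEC =====
def Spec_countingSortWithLimit (x : List Int) (l : Int) (out : List Int) : Prop := out = countingSortWithLimit_alt x l
instance (x : List Int) (l : Int) (out : List Int) : Decidable (Spec_countingSortWithLimit x l out) := by unfold Spec_countingSortWithLimit; infer_instance

-- ===== CLAIM (what is proved, stated in full; the proofs are below) =====
def Claim_equal_countingSortWithLimit : Prop := ∀ (x : List Int) (l : Int), Dom_countingSortWithLimit x l → Spec_countingSortWithLimit x l (countingSortWithLimit x l)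

-- ===== LEMMAS AND PROOFS =====

-- the ascending list of distinct values of a (sorted) list
def pvDvals : List Int → List Int
  | [] => []
  | v :: t => v :: (pvDvals t).filter (fun w => decide (v < w))

-- the common normal form of both outputs: for each distinct value (ascending),
-- min(count, l) copies
def pvCap (vs : List Int) (x : List Int) (l : Int) : List Int :=
  vs.flatMap (fun v => List.replicate (min ((x.count v : Int)) l).toNat v)

theorem pvDvals_subset (s : List Int) : ∀ w ∈ pvDvals s, w ∈ s := by
  induction s with
  | nil => simp [pvDvals]
  | cons v t ih =>
    intro w hw
    rw [pvDvals] at hw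
    rcases List.mem_cons.mp hw with h | h
    · simp [h]
    · exact List.mem_cons_of_mem _ (ih w (List.mem_of_mem_filter h))

theorem pvDvals_mem (s : List Int) (hs : s.Pairwise (· ≤ ·)) : ∀ w ∈ s, w ∈ pvDvals s := by
  induction s with
  | nil => simp
  | cons v t ih =>
    intro w hw
    rw [pvDvals]
    rcases List.mem_cons.mp hw with h | h
    · simp [h]
    · by_cases hvw : v < w
      · exact List.mem_cons_of_mem _
          (List.mem_filter.mpr ⟨ih (List.Pairwise.of_cons hs) w h, by simpa using hvw⟩)
      · have hle : v ≤ w := (List.pairwise_cons.mp hs).1 w h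
        have : w = v := le_antisymm (not_lt.mp hvw) hle
        simp [this]

theorem pvDvals_pairwise (s : List Int) (hs : s.Pairwise (· ≤ ·)) :
    (pvDvals s).Pairwise (· < ·) := by
  induction s with
  | nil => simp [pvDvals]
  | cons v t ih =>
    rw [pvDvals]
    refine List.pairwise_cons.mpr
      ⟨?_, List.Pairwise.filter _ (ih (List.Pairwise.of_cons hs))⟩
    intro w hw
    simpa using (List.mem_filter.mp hw).2

-- decomposition of a nonempty sorted list into its first run and a strictly larger rest
theorem pv_sorted_run (v : Int) (t : List Int) (h : (v :: t).Pairwise (· ≤ ·)) :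
    ∃ c rest, v :: t = List.replicate (c + 1) v ++ rest ∧
      rest.Pairwise (· ≤ ·) ∧ ∀ w ∈ rest, v < w := by
  induction t generalizing v with
  | nil => exact ⟨0, [], by simp, List.Pairwise.nil, by simp⟩
  | cons w t' ih =>
    have hvw : v ≤ w := (List.pairwise_cons.mp h).1 w (by simp)
    have hwt : (w :: t').Pairwise (· ≤ ·) := (List.pairwise_cons.mp h).2
    by_cases hvw' : v = w
    · subst hvw'
      obtain ⟨c, rest, heq, hrest, hgt⟩ := ih v hwt
      exact ⟨c + 1, rest, by rw [List.replicate_succ, List.cons_append, ← heq],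
        hrest, hgt⟩
    · refine ⟨0, w :: t', by simp, hwt, ?_⟩
      intro u hu
      have hv_lt_w : v < w := lt_of_le_of_ne hvw hvw'
      rcases List.mem_cons.mp hu with h1 | h1
      · simpa [h1] using hv_lt_w
      · exact lt_of_lt_of_le hv_lt_w ((List.pairwise_cons.mp hwt).1 u h1)

-- ---- B side ----

-- scanning one run of c copies of v with the counter already at r ≥ 0
theorem pv_scan_run (l v : Int) (c : Nat) :
    ∀ (out : List Int) (r : Int), 0 ≤ r →
    (List.replicate c v).foldl (pvAltStep l) (out, some v, r) =
      (out ++ List.replicate ((min (r + c) l).toNat - (min r l).toNat) v, some v, r + c) := by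
  induction c with
  | zero => intro out r hr; simp
  | succ c ih =>
    intro out r hr
    rw [List.replicate_succ, List.foldl_cons]
    have hstep : pvAltStep l (out, some v, r) v =
        (if r + 1 ≤ l then out ++ [v] else out, some v, r + 1) := by
      simp [pvAltStep]
    rw [hstep, ih _ (r + 1) (by omega)]
    refine Prod.ext ?_ (Prod.ext rfl (by push_cast; ring))
    by_cases h : r + 1 ≤ l
    · have hk : (min (r + 1 + (c : Int)) l).toNat - (min (r + 1) l).toNat + 1
          = (min (r + (c + 1 : Nat)) l).toNat - (min r l).toNat := by
        push_cast
        omega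
      simp only [if_pos h, List.append_assoc, List.singleton_append]
      rw [← List.replicate_succ, hk]
    · have hk : (min (r + 1 + (c : Int)) l).toNat - (min (r + 1) l).toNat
          = (min (r + (c + 1 : Nat)) l).toNat - (min r l).toNat := by
        push_cast
        omega
      simp only [if_neg h]
      rw [hk]

-- a full fresh run (prev ≠ v) emits exactly min(c+1, l).toNat copies
theorem pv_scan_fresh_run (l v : Int) (c : Nat) (out : List Int) (p : Option Int) (r : Int)
    (hp : p ≠ some v) :
    (List.replicate (c + 1) v).foldl (pvAltStep l) (out, p, r) =
      (out ++ List.replicate (min ((c : Int) + 1) l).toNat v, some v, (c : Int) + 1) := by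
  rw [List.replicate_succ, List.foldl_cons]
  have hstep : pvAltStep l (out, p, r) v =
      (if (1 : Int) ≤ l then out ++ [v] else out, some v, 1) := by
    simp [pvAltStep, hp]
  rw [hstep, pv_scan_run l v c _ 1 (by omega)]
  refine Prod.ext ?_ (Prod.ext rfl (by push_cast; ring))
  by_cases h : (1 : Int) ≤ l
  · have hk : ((min (1 + (c : Int)) l).toNat - (min 1 l).toNat) + 1
        = (min ((c : Int) + 1) l).toNat := by omega
    simp only [if_pos h, List.append_assoc, List.singleton_append]
    rw [← List.replicate_succ, hk]
  · have hk : (min (1 + (c : Int)) l).toNat - (min 1 l).toNat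
        = (min ((c : Int) + 1) l).toNat := by omega
    simp only [if_neg h]
    rw [hk]

theorem pvDvals_run (c : Nat) (v : Int) (rest : List Int) (hgt : ∀ w ∈ rest, v < w) :
    pvDvals (List.replicate (c + 1) v ++ rest) = v :: pvDvals rest := by
  have hfilter : (pvDvals rest).filter (fun w => decide (v < w)) = pvDvals rest :=
    List.filter_eq_self.mpr (fun w hw => by simpa using hgt w (pvDvals_subset rest w hw))
  induction c with
  | zero => rw [List.replicate_one, List.singleton_append, pvDvals, hfilter]
  | succ c ih =>
    rw [List.replicate_succ, List.cons_append, pvDvals, ih]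
    simp [hfilter]

theorem pvCap_congr (D s1 s2 : List Int) (l : Int) (h : ∀ w ∈ D, s1.count w = s2.count w) :
    pvCap D s1 l = pvCap D s2 l := by
  induction D with
  | nil => rfl
  | cons d D ih =>
    simp only [pvCap, List.flatMap_cons]
    rw [h d (by simp)]
    exact congrArg _ (ih (fun w hw => h w (List.mem_cons_of_mem _ hw)))

theorem pv_scan_sorted_aux (l : Int) :
    ∀ (n : Nat) (s : List Int), s.length ≤ n → s.Pairwise (· ≤ ·) →
    ∀ (out : List Int) (p : Option Int) (r : Int), (∀ v ∈ s, p ≠ some v) →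
    (s.foldl (pvAltStep l) (out, p, r)).1 = out ++ pvCap (pvDvals s) s l := by
  intro n
  induction n with
  | zero =>
    intro s hs _ out p r _
    have : s = [] := List.eq_nil_of_length_eq_zero (Nat.le_zero.mp hs)
    subst this
    simp [pvDvals, pvCap]
  | succ n ih =>
    intro s hlen hsort out p r hp
    match s, hlen, hsort, hp with
    | [], _, _, _ => simp [pvDvals, pvCap]
    | v :: t, hlen, hsort, hp =>
      obtain ⟨c, rest, heq, hrest, hgt⟩ := pv_sorted_run v t hsort
      have hvrest : v ∉ rest := fun hv => lt_irrefl v (hgt v hv)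
      rw [heq, List.foldl_append, pv_scan_fresh_run l v c out p r (hp v (by simp))]
      have hlen' : rest.length ≤ n := by
        have h2 := congrArg List.length heq
        simp only [List.length_cons, List.length_append, List.length_replicate] at h2
        simp only [List.length_cons] at hlen
        omega
      rw [ih rest hlen' hrest _ (some v) _
        (fun w hw => by simpa using (hgt w hw).ne)]
      rw [pvDvals_run c v rest hgt]
      have hcnt_v : ((List.replicate (c + 1) v ++ rest).count v : Int) = (c : Int) + 1 := by
        rw [List.count_append, List.count_replicate, List.count_eq_zero.mpr hvrest]
        simp
      have hcong : pvCap (pvDvals rest) (List.replicate (c + 1) v ++ rest) l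
          = pvCap (pvDvals rest) rest l := by
        refine pvCap_congr _ _ _ _ (fun w hw => ?_)
        have hne : ¬ (w = v) := by
          have := hgt w (pvDvals_subset rest w hw)
          omega
        have hne' : ¬ (v = w) := by omega
        rw [List.count_append, List.count_replicate]
        simp [hne']
      have hcong' :
          List.flatMap
            (fun w => List.replicate
              (min ((List.count w (List.replicate (c + 1) v ++ rest) : Int)) l).toNat w)
            (pvDvals rest)
          = List.flatMap
            (fun w => List.replicate (min ((List.count w rest : Int)) l).toNat w)
            (pvDvals rest) := hcong
      simp only [pvCap, List.flatMap_cons, hcnt_v, hcong']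
      rw [List.append_assoc]

theorem pv_scan_sorted (l : Int) (s : List Int) (hs : s.Pairwise (· ≤ ·)) :
    ∀ (out : List Int) (p : Option Int) (r : Int), (∀ v ∈ s, p ≠ some v) →
    (s.foldl (pvAltStep l) (out, p, r)).1 = out ++ pvCap (pvDvals s) s l :=
  pv_scan_sorted_aux l s.length s le_rfl hs

theorem pvB_eq_cap (x : List Int) (l : Int) :
    countingSortWithLimit_alt x l =
      pvCap (pvDvals (PySem.List.sorted x (fun v => v) false))
            (PySem.List.sorted x (fun v => v) false) l := by
  unfold countingSortWithLimit_alt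
  rw [pv_scan_sorted l _ (PySem.List.sorted_pairwise x (fun v => v)) [] none 0
    (fun v _ => by simp)]
  simp

-- ---- A side ----

theorem pv_countFold (mV : Int) :
    ∀ (ns : List Int) (cl : List Int), (∀ n ∈ ns, 0 ≤ n - mV ∧ (n - mV).toNat < cl.length) →
    ∀ j, j < cl.length →
      ((ns.foldl (fun cl n => cl.set (n - mV).toNat (cl.getD (n - mV).toNat 0 + 1)) cl).getD j 0
        = cl.getD j 0 + ns.count (mV + j) ∧
       (ns.foldl (fun cl n => cl.set (n - mV).toNat (cl.getD (n - mV).toNat 0 + 1)) cl).length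
        = cl.length) := by
  intro ns
  induction ns with
  | nil => intro cl _ j hj; simp
  | cons n ns ih =>
    intro cl hb j hj
    simp only [List.foldl_cons]
    have hn := hb n (by simp)
    have hlen' : (cl.set (n - mV).toNat (cl.getD (n - mV).toNat 0 + 1)).length = cl.length := by
      simp
    have hb' : ∀ m ∈ ns, 0 ≤ m - mV ∧
        (m - mV).toNat < (cl.set (n - mV).toNat (cl.getD (n - mV).toNat 0 + 1)).length := by
      intro m hm
      rw [hlen']
      exact hb m (by simp [hm])
    obtain ⟨h1, h2⟩ := ih (cl.set (n - mV).toNat (cl.getD (n - mV).toNat 0 + 1)) hb' j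
      (by rw [hlen']; exact hj)
    refine ⟨?_, by rw [h2, hlen']⟩
    rw [h1]
    by_cases hji : j = (n - mV).toNat
    · have hmvj : (mV + (j : Int)) = n := by omega
      have hset : (cl.set (n - mV).toNat (cl.getD (n - mV).toNat 0 + 1)).getD j 0
          = cl.getD j 0 + 1 := by
        subst hji
        rw [List.getD_eq_getElem?_getD, List.getElem?_set_self (by omega),
          Option.getD_some, List.getD_eq_getElem?_getD]
      rw [hset, List.count_cons]
      simp [hmvj]
      ring
    · have hmvj : ¬ ((mV + (j : Int)) = n) := by omega
      have hset : (cl.set (n - mV).toNat (cl.getD (n - mV).toNat 0 + 1)).getD j 0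
          = cl.getD j 0 := by
        rw [List.getD_eq_getElem?_getD, List.getElem?_set_ne (fun h => hji h.symm),
          List.getD_eq_getElem?_getD]
      rw [hset, List.count_cons]
      have hmvj' : ¬ (n = mV + (j : Int)) := by omega
      simp [hmvj']

theorem pv_flatMap_congr {a b : Type} (L : List a) (f g : a → List b)
    (h : ∀ y ∈ L, f y = g y) : L.flatMap f = L.flatMap g := by
  induction L with
  | nil => rfl
  | cons d D ih =>
    simp only [List.flatMap_cons]
    rw [h d (by simp), ih (fun y hy => h y (List.mem_cons_of_mem _ hy))]

theorem pv_flatMap_filter {a b : Type} (p : a → Bool) (g : a → List b) :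
    ∀ (L : List a), (∀ y ∈ L, p y = false → g y = []) →
    (L.filter p).flatMap g = L.flatMap g := by
  intro L
  induction L with
  | nil => intro _; rfl
  | cons d D ih =>
    intro h
    by_cases hp : p d = true
    · rw [List.filter_cons_of_pos hp, List.flatMap_cons, List.flatMap_cons,
        ih (fun y hy => h y (List.mem_cons_of_mem _ hy))]
    · rw [List.filter_cons_of_neg (by simpa using hp), List.flatMap_cons,
        h d (by simp) (by simpa using hp), List.nil_append,
        ih (fun y hy => h y (List.mem_cons_of_mem _ hy))]

theorem pvA_eq_cap_cons (h : Int) (t : List Int) (l : Int)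
    (hperm : (PySem.List.sorted (h :: t) (fun v => v) false).Perm (h :: t))
    (hmin : ∀ n ∈ h :: t, t.foldl min h ≤ n)
    (hmax : ∀ n ∈ h :: t, n ≤ t.foldl max h) :
    countingSortWithLimit (h :: t) l =
      pvCap (pvDvals (PySem.List.sorted (h :: t) (fun v => v) false))
            (PySem.List.sorted (h :: t) (fun v => v) false) l := by
  have hA : countingSortWithLimit (h :: t) l =
      (List.range ((t.foldl max h - t.foldl min h + 1).toNat)).foldl
        (fun out i => out ++ List.replicate
          (min (((h :: t).foldl
            (fun cl n => cl.set (n - t.foldl min h).toNat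
              (cl.getD (n - t.foldl min h).toNat 0 + 1))
            (List.replicate ((t.foldl max h - t.foldl min h + 1).toNat) 0)).getD i 0) l).toNat
          ((i : Int) + t.foldl min h))
        [] := rfl
  rw [hA]
  set mV := t.foldl min h with hmV
  set MV := t.foldl max h with hMV
  set R := (MV - mV + 1).toNat with hR
  set CL := (h :: t).foldl
      (fun cl n => cl.set (n - mV).toNat (cl.getD (n - mV).toNat 0 + 1))
      (List.replicate R (0 : Int)) with hCL
  have hbounds : ∀ n ∈ h :: t, 0 ≤ n - mV ∧
      (n - mV).toNat < (List.replicate R (0 : Int)).length := by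
    intro n hn
    have h1 := hmin n hn
    have h2 := hmax n hn
    rw [List.length_replicate]
    omega
  have hcount := pv_countFold mV (h :: t) (List.replicate R 0) hbounds
  rw [PySem.List.foldl_append_eq_flatMap, List.nil_append]
  have hcongr :
      List.flatMap
        (fun i => List.replicate (min (CL.getD i 0) l).toNat ((i : Int) + mV))
        (List.range R)
      = List.flatMap
        (fun (i : Nat) => List.replicate
          (min (((h :: t).count (mV + (i : Int)) : Int)) l).toNat (mV + (i : Int)))
        (List.range R) := by
    apply pv_flatMap_congr
    intro i hi
    have hiR : i < (List.replicate R (0 : Int)).length := by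
      rw [List.length_replicate]
      exact List.mem_range.mp hi
    obtain ⟨h1, _⟩ := hcount i hiR
    rw [hCL, h1]
    have h0 : (List.replicate R (0 : Int)).getD i 0 = 0 := by
      simp [List.getD_eq_getElem?_getD, List.mem_range.mp hi]
    rw [h0, zero_add, show (i : Int) + mV = mV + (i : Int) from by ring]
  rw [hcongr]
  have hmap :
      List.flatMap
        (fun (i : Nat) => List.replicate
          (min (((h :: t).count (mV + (i : Int)) : Int)) l).toNat (mV + (i : Int)))
        (List.range R)
      = List.flatMap
        (fun v => List.replicate (min (((h :: t).count v : Int)) l).toNat v)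
        ((List.range R).map (fun (i : Nat) => mV + (i : Int))) := by
    simp [List.flatMap_map]
  rw [hmap]
  rw [← pv_flatMap_filter (fun v => decide (0 < (h :: t).count v))
    (fun v => List.replicate (min (((h :: t).count v : Int)) l).toNat v) _
    (by
      intro v _ hv
      have hz : (h :: t).count v = 0 := by
        by_contra hc
        simp [Nat.pos_of_ne_zero hc] at hv
      simp [hz])]
  have hLD : ((List.range R).map (fun (i : Nat) => mV + (i : Int))).filter
        (fun v => decide (0 < (h :: t).count v))
      = pvDvals (PySem.List.sorted (h :: t) (fun v => v) false) := by
    apply List.Perm.eq_of_pairwise (le := fun a b : Int => a < b)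
      (fun a b _ _ h1 h2 => absurd h1 (not_lt.mpr h2.le)) ?_ ?_ ?_
    · refine List.Pairwise.filter _ (List.Pairwise.map _ ?_ List.pairwise_lt_range)
      intro i j hij
      exact by omega
    · exact pvDvals_pairwise _ (PySem.List.sorted_pairwise (h :: t) (fun v => v))

    · rw [List.perm_ext_iff_of_nodup]
      · intro v
        constructor
        · intro hv
          have h1 := List.of_mem_filter hv
          have hc : 0 < (h :: t).count v := by simpa using h1
          have hvx : v ∈ h :: t := List.count_pos_iff.mp hc
          exact pvDvals_mem _ (PySem.List.sorted_pairwise (h :: t) (fun v => v))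
            v (hperm.mem_iff.mpr hvx)
        · intro hv
          have hvs := pvDvals_subset _ v hv
          have hvx : v ∈ h :: t := hperm.mem_iff.mp hvs
          refine List.mem_filter.mpr ⟨?_, by simp [List.count_pos_iff.mpr hvx]⟩
          refine List.mem_map.mpr ⟨(v - mV).toNat, List.mem_range.mpr ?_, ?_⟩
          · have h1 := hmin v hvx
            have h2 := hmax v hvx
            omega
          · have h1 := hmin v hvx
            omega
      · refine List.Nodup.filter _ (List.Nodup.map ?_ List.nodup_range)
        intro i j hij
        have h' : (mV + (i : Int)) = mV + (j : Int) := hij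
        omega
      · exact List.Pairwise.imp ne_of_lt
          (pvDvals_pairwise _ (PySem.List.sorted_pairwise (h :: t) (fun v => v)))
  rw [hLD]
  exact pvCap_congr _ _ _ _ (fun w _ => (hperm.count_eq w).symm)

theorem pvA_eq_cap (x : List Int) (l : Int) :
    countingSortWithLimit x l =
      pvCap (pvDvals (PySem.List.sorted x (fun v => v) false))
            (PySem.List.sorted x (fun v => v) false) l := by
  match x with
  | [] =>
    have hs : PySem.List.sorted ([] : List Int) (fun v => v) false = [] := by
      rw [PySem.List.sorted_eq_nil_iff]
    rw [hs]
    rfl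
  | h :: t =>
    have hperm : (PySem.List.sorted (h :: t) (fun v => v) false).Perm (h :: t) :=
      PySem.List.sorted_perm (h :: t) (fun v => v) false
    have hmin : ∀ n ∈ h :: t, t.foldl min h ≤ n :=
      PySem.List.min?_isMin (PySem.List.min?_id_cons h t)
    have hmax : ∀ n ∈ h :: t, n ≤ t.foldl max h :=
      PySem.List.max?_isMax (PySem.List.max?_id_cons h t)
    exact pvA_eq_cap_cons h t l hperm hmin hmax

-- ===== VERDICT (by name: the statement is the Claim_ definition above) =====
theorem countingSortWithLimit_spec : Claim_equal_countingSortWithLimit := by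
  intro x l _
  unfold Spec_countingSortWithLimit
  rw [pvA_eq_cap, pvB_eq_cap]
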